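-- pv_equiv track=rewrite | github.com/JSchpp12/Terrain-Stitcher | src/terrain_stitcher/dataSources/HighResolutionOrthoImagery.py | GroupOverlappingChunks
-- ===== SOURCE A (Python) =====
-- from collections import defaultdict
--
-- def GroupOverlappingChunks(overlapPairs, numChunks) -> list:
--     # Build adjacency list
--     graph = defaultdict(set)
--     for i, j, _ in overlapPairs:
--         graph[i].add(j)
--         graph[j].add(i)
--
--     # DFS to find connected components
--     visited = set()
--     groups = []
--
--     def dfs(node, group):
--         visited.add(node)
--         group.add(node)
--         for neighbor in graph[node]:
--             if neighbor not in visited: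
--                 dfs(neighbor, group)
--
--     for i in range(numChunks):
--         if i not in visited:
--             group = set()
--             dfs(i, group)
--             if group:
--                 groups.append(group)
--
--     return groups
-- ===== SOURCE B (Python) =====
-- def GroupOverlappingChunks(overlapPairs, numChunks) -> list:
--     # Adjacency in a plain dict (setdefault instead of defaultdict)
--     adj = {}
--     for i, j, _ in overlapPairs:
--         adj.setdefault(i, set()).add(j)
--         adj.setdefault(j, set()).add(i)
--
--     visited = set()
--     groups = []
--     for i in range(numChunks):
--         if i in visited:
--             continue
--         # iterative DFS with an explicit stack of neighbour iterators
--         visited.add(i)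
--         group = {i}
--         stack = [iter(adj.get(i, ()))]
--         while stack:
--             m = next(stack[-1], None)
--             if m is None:
--                 stack.pop()
--             elif m not in visited:
--                 visited.add(m)
--                 group.add(m)
--                 stack.append(iter(adj.get(m, ())))
--         groups.append(group)
--     return groups
-- ===== Notes on version B (the rewrite author's own statement) =====
-- stated objective: alternative
-- what changed: Replaces the recursive DFS over a defaultdict(set) by an iterative DFS with an explicit stack of neighbour iterators over a plain dict built with setdefault, appending each group unconditionally (a group is never empty), so B needs no recursion (and is immune to Python's recursion limit on deep components).
import Mathlib
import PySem

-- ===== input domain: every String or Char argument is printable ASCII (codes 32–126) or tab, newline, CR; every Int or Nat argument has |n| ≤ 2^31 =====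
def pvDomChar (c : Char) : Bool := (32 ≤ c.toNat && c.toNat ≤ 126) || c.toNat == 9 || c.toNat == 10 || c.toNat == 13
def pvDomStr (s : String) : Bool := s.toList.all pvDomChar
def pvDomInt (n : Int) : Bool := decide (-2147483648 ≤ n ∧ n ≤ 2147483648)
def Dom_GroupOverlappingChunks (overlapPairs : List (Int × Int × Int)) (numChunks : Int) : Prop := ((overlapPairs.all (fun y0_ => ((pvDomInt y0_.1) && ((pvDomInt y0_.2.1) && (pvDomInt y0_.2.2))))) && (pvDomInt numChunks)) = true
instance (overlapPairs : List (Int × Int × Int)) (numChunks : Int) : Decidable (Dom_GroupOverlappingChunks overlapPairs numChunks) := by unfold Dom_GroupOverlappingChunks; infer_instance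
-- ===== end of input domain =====

-- B replaces A's recursive DFS by an iterative DFS with an explicit stack of neighbour
-- iterators over a plain dict (alternative decomposition; no recursion). Return value only:
-- both build local structures, neither mutates its arguments.
-- Inner lists represent Python sets (distinct elements; compared as finite sets).
-- The Nat fuel arguments in both ports are totality guards only: the DFS depth is bounded
-- by the number of distinct nodes, which is < 2*|overlapPairs|+2, so with the fuel the
-- mains pass the 0-fuel branches are never taken.

-- ===== PORT A =====
-- graph = defaultdict(set); graph[i].add(j); graph[j].add(i)
def pvBuildGraph (overlapPairs : List (Int × Int × Int)) : PySem.Dict Int (PySem.Set Int) :=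
  overlapPairs.foldl
    (fun g t =>
      let g1 := g.modify t.1 PySem.Set.empty (fun s => PySem.Set.add s t.2.1)
      g1.modify t.2.1 PySem.Set.empty (fun s => PySem.Set.add s t.1))
    PySem.Dict.empty

-- dfs(node, group): state = (visited, group); iterating graph[node] (a Python set) is
-- ported in the PySem.Set's insertion order (the result, a set, does not depend on it).
mutual
def pvDfsA (g : PySem.Dict Int (PySem.Set Int)) (fuel : Nat) (node : Int)
    (st : PySem.Set Int × PySem.Set Int) : PySem.Set Int × PySem.Set Int :=
  match fuel with
  | 0 => st
  | Nat.succ f =>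
      pvDfsListA g f (g.getD node PySem.Set.empty)
        (PySem.Set.add st.1 node, PySem.Set.add st.2 node)
termination_by (fuel, 0)

def pvDfsListA (g : PySem.Dict Int (PySem.Set Int)) (fuel : Nat) (ns : List Int)
    (st : PySem.Set Int × PySem.Set Int) : PySem.Set Int × PySem.Set Int :=
  match ns with
  | [] => st
  | n :: tail =>
      pvDfsListA g fuel tail
        (if PySem.Set.contains st.1 n then st else pvDfsA g fuel n st)
termination_by (fuel, ns.length + 1)
end

def GroupOverlappingChunks (overlapPairs : List (Int × Int × Int)) (numChunks : Int) : List (List Int) :=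
  let graph := pvBuildGraph overlapPairs
  let r := (PySem.List.pyRange 0 numChunks 1).foldl
    (fun (acc : PySem.Set Int × List (List Int)) i =>
      if PySem.Set.contains acc.1 i then acc
      else
        let st := pvDfsA graph (2 * overlapPairs.length + 2) i (acc.1, PySem.Set.empty)
        (st.1, if st.2 = [] then acc.2 else acc.2 ++ [st.2]))
    (PySem.Set.empty, [])
  r.2

-- ===== PORT B =====
-- adj = {}; adj.setdefault(i, set()).add(j); adj.setdefault(j, set()).add(i)
def pvBuildAdj (overlapPairs : List (Int × Int × Int)) : PySem.Dict Int (PySem.Set Int) :=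
  overlapPairs.foldl
    (fun d t =>
      let d1 := (PySem.Dict.setdefault d t.1 PySem.Set.empty).modify t.1 PySem.Set.empty
        (fun s => PySem.Set.add s t.2.1)
      (PySem.Dict.setdefault d1 t.2.1 PySem.Set.empty).modify t.2.1 PySem.Set.empty
        (fun s => PySem.Set.add s t.1))
    PySem.Dict.empty

-- weight for the termination measure of the stack loop (proof device only)
def pvW (g : PySem.Dict Int (PySem.Set Int)) : Nat :=
  2 + (g.values.map List.length).foldl Nat.max 0

def pvMeasure (g : PySem.Dict Int (PySem.Set Int)) (frames : List (Nat × List Int)) : Nat :=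
  (frames.map (fun p => (p.2.length + 1) * pvW g ^ p.1)).sum

theorem pvBase_le_foldl_max (l : List Nat) (a : Nat) : a ≤ l.foldl Nat.max a := by
  induction l generalizing a with
  | nil => exact le_refl a
  | cons z zs ih => exact le_trans (Nat.le_max_left a z) (ih (Nat.max a z))

theorem pvLe_foldl_max (l : List Nat) (a x : Nat) (hx : x ∈ l) : x ≤ l.foldl Nat.max a := by
  induction l generalizing a with
  | nil => cases hx
  | cons y ys ih =>
      cases hx with
      | head => exact le_trans (Nat.le_max_right a x) (pvBase_le_foldl_max ys (Nat.max a x))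
      | tail _ hmem => exact ih (Nat.max a y) hmem

theorem pvAdjLen_lt (g : PySem.Dict Int (PySem.Set Int)) (m : Int) :
    (g.getD m PySem.Set.empty).length + 1 < pvW g := by
  unfold pvW
  rw [PySem.Dict.getD_eq_get?_getD]
  cases hg : g.get? m with
  | none =>
      simp [PySem.Set.empty]
      omega
  | some v =>
      simp only [Option.getD_some]
      have hv : v ∈ g.values := by
        have := PySem.Dict.mem_items_of_get?_eq_some (d := g) hg
        have : v ∈ g.items.map (·.2) := List.mem_map.mpr ⟨(m, v), this, rfl⟩
        simpa [PySem.Dict.values] using this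
      have := pvLe_foldl_max (g.values.map List.length) 0 v.length
        (List.mem_map.mpr ⟨v, hv, rfl⟩)
      omega

-- iterative DFS: stack of (depth-guard, remaining neighbours); visits exactly like A's dfs
def pvRunB (g : PySem.Dict Int (PySem.Set Int)) (frames : List (Nat × List Int))
    (st : PySem.Set Int × PySem.Set Int) : PySem.Set Int × PySem.Set Int :=
  match frames with
  | [] => st
  | (f, rest) :: fr =>
    match rest with
    | [] => pvRunB g fr st
    | m :: ms =>
      if PySem.Set.contains st.1 m then pvRunB g ((f, ms) :: fr) st
      else
        match f with
        | 0 => pvRunB g ((0, ms) :: fr) st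
        | Nat.succ f' =>
            pvRunB g ((f', (g.getD m PySem.Set.empty : List Int)) :: (Nat.succ f', ms) :: fr)
              (PySem.Set.add st.1 m, PySem.Set.add st.2 m)
termination_by pvMeasure g frames
decreasing_by
  all_goals simp [pvMeasure, Nat.add_mul]
  · exact Nat.pow_pos (by unfold pvW; omega)
  · exact Nat.pow_pos (by unfold pvW; omega)
  · have h2 : 0 < pvW g ^ f' := Nat.pow_pos (by unfold pvW; omega)
    have key : List.length (g.getD m PySem.Set.empty) * pvW g ^ f' + pvW g ^ f' < pvW g ^ (f' + 1) := by
      have h3 := pvAdjLen_lt g m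
      calc List.length (g.getD m PySem.Set.empty) * pvW g ^ f' + pvW g ^ f'
          = (List.length (g.getD m PySem.Set.empty) + 1) * pvW g ^ f' := by ring
        _ < pvW g * pvW g ^ f' := (Nat.mul_lt_mul_right h2).mpr h3
        _ = pvW g ^ (f' + 1) := by rw [pow_succ]; ring
    simp [PySem.Set.empty] at key
    omega

def GroupOverlappingChunks_alt (overlapPairs : List (Int × Int × Int)) (numChunks : Int) : List (List Int) :=
  let adj := pvBuildAdj overlapPairs
  let r := (PySem.List.pyRange 0 numChunks 1).foldl
    (fun (acc : PySem.Set Int × List (List Int)) i =>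
      if PySem.Set.contains acc.1 i then acc
      else
        let st := pvRunB adj
          [(2 * overlapPairs.length + 1, (adj.getD i PySem.Set.empty : List Int))]
          (PySem.Set.add acc.1 i, PySem.Set.add PySem.Set.empty i)
        (st.1, acc.2 ++ [st.2]))
    (PySem.Set.empty, [])
  r.2

-- ===== PRECONDITION & SPEC =====
def Spec_GroupOverlappingChunks (overlapPairs : List (Int × Int × Int)) (numChunks : Int) (out : List (List Int)) : Prop := out = GroupOverlappingChunks_alt overlapPairs numChunks
instance (overlapPairs : List (Int × Int × Int)) (numChunks : Int) (out : List (List Int)) : Decidable (Spec_GroupOverlappingChunks overlapPairs numChunks out) := by unfold Spec_GroupOverlappingChunks; infer_instance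

-- ===== CLAIM (what is proved, stated in full; the proofs are below) =====
def Claim_equal_GroupOverlappingChunks : Prop := ∀ (overlapPairs : List (Int × Int × Int)) (numChunks : Int), Dom_GroupOverlappingChunks overlapPairs numChunks → Spec_GroupOverlappingChunks overlapPairs numChunks (GroupOverlappingChunks overlapPairs numChunks)

-- ===== LEMMAS AND PROOFS =====

-- setdefault-then-modify at the same key is modify-with-default
theorem pvSetdefault_modify (d : PySem.Dict Int (PySem.Set Int)) (k : Int)
    (f : PySem.Set Int → PySem.Set Int) :
    (PySem.Dict.setdefault d k PySem.Set.empty).modify k PySem.Set.empty f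
      = d.modify k PySem.Set.empty f := by
  by_cases h : d.contains k = true
  · rw [PySem.Dict.setdefault_of_contains (h := h)]
  · have h' : d.contains k = false := by simpa using h
    rw [PySem.Dict.setdefault_of_not_contains (h := h')]
    have e1 : ∀ (e : PySem.Dict Int (PySem.Set Int)),
        e.modify k PySem.Set.empty f = e.insert k (f (e.getD k PySem.Set.empty)) :=
      fun e => rfl
    rw [e1, e1, PySem.Dict.insert_insert_self, PySem.Dict.getD_insert_self,
      PySem.Dict.getD_of_not_contains (h := h')]

-- the two adjacency builders coincide
theorem pvBuild_eq (overlapPairs : List (Int × Int × Int)) :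
    pvBuildAdj overlapPairs = pvBuildGraph overlapPairs := by
  unfold pvBuildAdj pvBuildGraph
  have hstep :
      (fun (d : PySem.Dict Int (PySem.Set Int)) (t : Int × Int × Int) =>
        let d1 := (PySem.Dict.setdefault d t.1 PySem.Set.empty).modify t.1 PySem.Set.empty
          (fun s => PySem.Set.add s t.2.1)
        (PySem.Dict.setdefault d1 t.2.1 PySem.Set.empty).modify t.2.1 PySem.Set.empty
          (fun s => PySem.Set.add s t.1))
      = (fun (g : PySem.Dict Int (PySem.Set Int)) (t : Int × Int × Int) =>
        let g1 := g.modify t.1 PySem.Set.empty (fun s => PySem.Set.add s t.2.1)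
        g1.modify t.2.1 PySem.Set.empty (fun s => PySem.Set.add s t.1)) := by
    funext d t
    dsimp only
    rw [pvSetdefault_modify, pvSetdefault_modify]
  rw [hstep]

-- the group component of the state only grows (by appends)
theorem pvAdd_append (s : PySem.Set Int) (x : Int) :
    ∃ u, PySem.Set.add s x = s ++ u := by
  by_cases h : x ∈ s
  · exact ⟨[], by rw [PySem.Set.add_of_mem (h := h)]; simp⟩
  · exact ⟨[x], PySem.Set.add_of_not_mem (h := h)⟩

theorem pvGrowsL (g : PySem.Dict Int (PySem.Set Int)) :
    ∀ (f : Nat) (ns : List Int) (st : PySem.Set Int × PySem.Set Int),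
      ∃ t, (pvDfsListA g f ns st).2 = st.2 ++ t := by
  intro f
  induction f with
  | zero =>
      intro ns
      induction ns with
      | nil => exact fun st => ⟨[], by simp [pvDfsListA]⟩
      | cons n tail ih =>
          intro st
          by_cases h : n ∈ st.1
          · obtain ⟨t, ht⟩ := ih st
            exact ⟨t, by simpa [pvDfsListA, h] using ht⟩
          · obtain ⟨t, ht⟩ := ih st
            exact ⟨t, by simpa [pvDfsListA, pvDfsA, h] using ht⟩
  | succ f' ihf =>
      intro ns
      induction ns with
      | nil => exact fun st => ⟨[], by simp [pvDfsListA]⟩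
      | cons n tail ih =>
          intro st
          by_cases h : n ∈ st.1
          · obtain ⟨t, ht⟩ := ih st
            exact ⟨t, by simpa [pvDfsListA, h] using ht⟩
          · obtain ⟨u, hu⟩ := pvAdd_append st.2 n
            obtain ⟨t1, ht1⟩ := ihf (g.getD n PySem.Set.empty)
              (PySem.Set.add st.1 n, PySem.Set.add st.2 n)
            obtain ⟨t2, ht2⟩ := ih (pvDfsA g (Nat.succ f') n st)
            refine ⟨u ++ t1 ++ t2, ?_⟩
            have hA : (pvDfsA g (Nat.succ f') n st).2 = st.2 ++ (u ++ t1) := by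
              have e : pvDfsA g (Nat.succ f') n st
                  = pvDfsListA g f' (g.getD n PySem.Set.empty)
                      (PySem.Set.add st.1 n, PySem.Set.add st.2 n) := by
                simp [pvDfsA]
              rw [e, ht1]
              dsimp only
              rw [hu, List.append_assoc]
            have e2 : pvDfsListA g (Nat.succ f') (n :: tail) st
                = pvDfsListA g (Nat.succ f') tail (pvDfsA g (Nat.succ f') n st) := by
              simp [pvDfsListA, h]
            rw [e2, ht2, hA]
            simp [List.append_assoc]

-- simulation: one stack frame is one suspended recursive call
theorem pvKey (g : PySem.Dict Int (PySem.Set Int)) :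
    ∀ (f : Nat) (rest : List Int) (fr : List (Nat × List Int))
      (st : PySem.Set Int × PySem.Set Int),
      pvRunB g ((f, rest) :: fr) st = pvRunB g fr (pvDfsListA g f rest st) := by
  intro f
  induction f with
  | zero =>
      intro rest
      induction rest with
      | nil => intro fr st; simp [pvRunB, pvDfsListA]
      | cons m ms ih =>
          intro fr st
          by_cases h : m ∈ st.1
          · have e : pvRunB g ((0, m :: ms) :: fr) st = pvRunB g ((0, ms) :: fr) st := by
              simp [pvRunB, h]
            rw [e, ih]
            simp [pvDfsListA, h]
          · have e : pvRunB g ((0, m :: ms) :: fr) st = pvRunB g ((0, ms) :: fr) st := by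
              simp [pvRunB, h]
            rw [e, ih]
            simp [pvDfsListA, pvDfsA, h]
  | succ f' ihf =>
      intro rest
      induction rest with
      | nil => intro fr st; simp [pvRunB, pvDfsListA]
      | cons m ms ih =>
          intro fr st
          by_cases h : m ∈ st.1
          · have e : pvRunB g ((Nat.succ f', m :: ms) :: fr) st
                = pvRunB g ((Nat.succ f', ms) :: fr) st := by
              simp [pvRunB, h]
            rw [e, ih]
            simp [pvDfsListA, h]
          · have e : pvRunB g ((Nat.succ f', m :: ms) :: fr) st
                = pvRunB g ((f', (g.getD m PySem.Set.empty : List Int)) :: (Nat.succ f', ms) :: fr)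
                    (PySem.Set.add st.1 m, PySem.Set.add st.2 m) := by
              simp [pvRunB, h]
            rw [e, ihf, ih]
            have e2 : pvDfsListA g (Nat.succ f') (m :: ms) st
                = pvDfsListA g (Nat.succ f') ms (pvDfsA g (Nat.succ f') m st) := by
              simp [pvDfsListA, h]
            have e3 : pvDfsA g (Nat.succ f') m st
                = pvDfsListA g f' (g.getD m PySem.Set.empty)
                    (PySem.Set.add st.1 m, PySem.Set.add st.2 m) := by
              simp [pvDfsA]
            rw [e2, e3]

-- ===== VERDICT (by name: the statement is the Claim_ definition above) =====
theorem GroupOverlappingChunks_spec : Claim_equal_GroupOverlappingChunks := by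
  intro overlapPairs numChunks _
  unfold Spec_GroupOverlappingChunks GroupOverlappingChunks GroupOverlappingChunks_alt
  rw [pvBuild_eq]
  simp only []
  have hfun :
      (fun (acc : PySem.Set Int × List (List Int)) (i : Int) =>
        if PySem.Set.contains acc.1 i then acc
        else
          let st := pvDfsA (pvBuildGraph overlapPairs) (2 * overlapPairs.length + 2) i
            (acc.1, PySem.Set.empty)
          (st.1, if st.2 = [] then acc.2 else acc.2 ++ [st.2]))
      = (fun (acc : PySem.Set Int × List (List Int)) (i : Int) =>
        if PySem.Set.contains acc.1 i then acc
        else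
          let st := pvRunB (pvBuildGraph overlapPairs)
            [(2 * overlapPairs.length + 1,
              ((pvBuildGraph overlapPairs).getD i PySem.Set.empty : List Int))]
            (PySem.Set.add acc.1 i, PySem.Set.add PySem.Set.empty i)
          (st.1, acc.2 ++ [st.2])) := by
    funext acc i
    by_cases h : i ∈ acc.1
    · simp [h]
    · have h21 : 2 * overlapPairs.length + 2 = Nat.succ (2 * overlapPairs.length + 1) := rfl
      have hA : pvDfsA (pvBuildGraph overlapPairs) (2 * overlapPairs.length + 2) i
            (acc.1, PySem.Set.empty)
          = pvDfsListA (pvBuildGraph overlapPairs) (2 * overlapPairs.length + 1)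
              ((pvBuildGraph overlapPairs).getD i PySem.Set.empty)
              (PySem.Set.add acc.1 i, PySem.Set.add PySem.Set.empty i) := by
        rw [h21]
        simp [pvDfsA]
      have hB : pvRunB (pvBuildGraph overlapPairs)
            [(2 * overlapPairs.length + 1,
              ((pvBuildGraph overlapPairs).getD i PySem.Set.empty : List Int))]
            (PySem.Set.add acc.1 i, PySem.Set.add PySem.Set.empty i)
          = pvDfsListA (pvBuildGraph overlapPairs) (2 * overlapPairs.length + 1)
              ((pvBuildGraph overlapPairs).getD i PySem.Set.empty)
              (PySem.Set.add acc.1 i, PySem.Set.add PySem.Set.empty i) := by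
        rw [pvKey]
        simp [pvRunB]
      obtain ⟨t, ht⟩ := pvGrowsL (pvBuildGraph overlapPairs) (2 * overlapPairs.length + 1)
        ((pvBuildGraph overlapPairs).getD i PySem.Set.empty)
        (PySem.Set.add acc.1 i, PySem.Set.add PySem.Set.empty i)
      have hne : (pvDfsListA (pvBuildGraph overlapPairs) (2 * overlapPairs.length + 1)
          ((pvBuildGraph overlapPairs).getD i PySem.Set.empty)
          (PySem.Set.add acc.1 i, PySem.Set.add PySem.Set.empty i)).2 ≠ [] := by
        rw [ht]
        show ([i] : List Int) ++ t ≠ []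
        simp
      have hc : PySem.Set.contains acc.1 i = false := by simpa using h
      simp only [hc, Bool.false_eq_true, if_false, hA, hB]
      rw [if_neg hne]
  rw [hfun]
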